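-- pv_equiv track=rewrite | github.com/marzwu/pytools | shunzi.py | get_gap_len
-- ===== SOURCE A (Python) =====
-- def get_gap_len(mark):
--     new_mark = None
--     for i in range(len(mark)):
--         if mark[i] != 0:
--             new_mark = mark[i:]
--             break
--     for i in range(len(new_mark) - 1, -1, -1):
--         if new_mark[i] != 0:
--             new_mark = new_mark[:i]
--             break
--     len_gap = 0
--     for i in range(len(new_mark)):
--         if new_mark[i] == 0:
--             len_gap += 1
--
--     return len_gap
-- ===== SOURCE B (Python) =====
-- def get_gap_len(mark):
--     nz = [i for i, x in enumerate(mark) if x != 0]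
--     return nz[-1] - nz[0] - (len(nz) - 1)
-- ===== Notes on version B (the rewrite author's own statement) =====
-- stated objective: simpler
-- what changed: Replaces the three index loops with slicing (trim leading zeros, trim from the last nonzero, count zeros) by one comprehension collecting the nonzero positions and the closed form last - first - (count - 1).
import Mathlib
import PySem

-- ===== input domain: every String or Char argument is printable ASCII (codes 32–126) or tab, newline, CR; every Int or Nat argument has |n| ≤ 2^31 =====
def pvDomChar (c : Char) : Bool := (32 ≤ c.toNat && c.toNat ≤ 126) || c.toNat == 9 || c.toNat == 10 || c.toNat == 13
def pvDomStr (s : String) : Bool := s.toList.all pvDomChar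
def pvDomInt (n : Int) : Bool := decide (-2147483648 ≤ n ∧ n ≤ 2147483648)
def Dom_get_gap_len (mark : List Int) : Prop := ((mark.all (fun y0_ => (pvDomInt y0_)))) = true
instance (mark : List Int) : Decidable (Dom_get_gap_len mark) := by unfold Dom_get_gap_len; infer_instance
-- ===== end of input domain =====

-- B replaces A's three index loops and slices by one pass collecting the
-- nonzero positions and the closed form last - first - (count - 1).

-- ===== PORT A =====
-- first loop: scan for the first nonzero, new_mark = mark[i:] (none = Python's new_mark is still None)
def pvFirst : List Int → Option (List Int)
  | [] => none
  | x :: rest => if x ≠ 0 then some (x :: rest) else pvFirst rest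

-- second loop: for i in range(len(nm)-1, -1, -1): if nm[i] != 0: return nm[:i]
def pvSecond (nm : List Int) : Nat → List Int
  | 0 => nm
  | Nat.succ i => if nm.getD i 0 ≠ 0 then nm.take i else pvSecond nm i

def get_gap_len (mark : List Int) : Int :=
  match pvFirst mark with
  | none => 0  -- Python raises TypeError here (len(None)); excluded by Pre_
  | some nm =>
    let nm2 := pvSecond nm nm.length
    nm2.foldl (fun acc x => if x = 0 then acc + 1 else acc) 0

-- ===== PORT B =====
def get_gap_len_alt (mark : List Int) : Int :=
  let nz := ((PySem.List.enumerate mark 0).filter (fun p => p.2 != 0)).map (fun p => p.1)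
  match nz with
  | [] => 0  -- Python raises IndexError here; excluded by Pre_
  | f :: rest => rest.getLastD f - f - ((nz.length : Int) - 1)

-- ===== PRECONDITION & SPEC =====
-- Pre_ excludes exactly the inputs with no nonzero element: there A raises TypeError
-- (new_mark stays None) and B raises IndexError (nz is empty).
def Pre_get_gap_len (mark : List Int) : Prop := ∃ x ∈ mark, x ≠ 0
instance (mark : List Int) : Decidable (Pre_get_gap_len mark) := by unfold Pre_get_gap_len; infer_instance
def pvWitness_get_gap_len : List Int := [0, 3, 0, 0, 5, 0]

def Spec_get_gap_len (mark : List Int) (out : Int) : Prop := out = get_gap_len_alt mark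
instance (mark : List Int) (out : Int) : Decidable (Spec_get_gap_len mark out) := by unfold Spec_get_gap_len; infer_instance

-- ===== CLAIM (what is proved, stated in full; the proofs are below) =====
def Claim_equal_get_gap_len : Prop := ∀ (mark : List Int), Dom_get_gap_len mark → Pre_get_gap_len mark → Spec_get_gap_len mark (get_gap_len mark)

-- ===== LEMMAS AND PROOFS =====

-- the list of indices of the nonzero elements, as B's comprehension builds it
def nzIdx (l : List Int) (s : Int) : List Int :=
  ((PySem.List.enumerate l s).filter (fun p => p.2 != 0)).map (fun p => p.1)

theorem nzIdx_nil (s : Int) : nzIdx [] s = [] := rfl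

theorem nzIdx_cons (x : Int) (t : List Int) (s : Int) :
    nzIdx (x :: t) s = if x ≠ 0 then s :: nzIdx t (s + 1) else nzIdx t (s + 1) := by
  simp [nzIdx, PySem.List.enumerate_cons, List.filter_cons]
  split_ifs <;> simp_all

theorem nzIdx_append (l1 l2 : List Int) (s : Int) :
    nzIdx (l1 ++ l2) s = nzIdx l1 s ++ nzIdx l2 (s + l1.length) := by
  simp [nzIdx, PySem.List.enumerate_append]

theorem nzIdx_zeros (l : List Int) (s : Int) (h : ∀ x ∈ l, x = 0) : nzIdx l s = [] := by
  induction l generalizing s with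
  | nil => rfl
  | cons x t ih =>
    rw [nzIdx_cons]
    have hx : x = 0 := h x (by simp)
    simp [hx, ih _ (fun y hy => h y (by simp [hy]))]

theorem nzIdx_length (l : List Int) (s : Int) :
    (nzIdx l s).length = l.countP (fun x => x != 0) := by
  induction l generalizing s with
  | nil => rfl
  | cons x t ih =>
    rw [nzIdx_cons, List.countP_cons]
    by_cases hx : x = 0 <;> simp [hx, ih]

theorem count_split (l : List Int) :
    l.countP (fun x => x == 0) + l.countP (fun x => x != 0) = l.length := by
  induction l with
  | nil => rfl
  | cons x t ih =>
    rw [List.countP_cons, List.countP_cons]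
    by_cases hx : x = 0 <;> simp [hx] <;> omega

theorem pvFirst_zeros (z m : List Int) (hz : ∀ x ∈ z, x = 0) :
    pvFirst (z ++ m) = pvFirst m := by
  induction z with
  | nil => rfl
  | cons x t ih =>
    have hx : x = 0 := hz x (by simp)
    simp [pvFirst, hx, ih (fun y hy => hz y (by simp [hy]))]

theorem pvFirst_cons_ne (a : Int) (t : List Int) (ha : a ≠ 0) :
    pvFirst (a :: t) = some (a :: t) := by simp [pvFirst, ha]

theorem pvSecond_concat (nm : List Int) (c : Int) (h0 : nm.getD 0 0 ≠ 0) :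
    ∀ i, i + 1 ≤ nm.length → pvSecond (nm ++ [c]) (i + 1) = pvSecond nm (i + 1) := by
  intro i
  induction i with
  | zero =>
    intro h1
    have hg : (nm ++ [c]).getD 0 0 = nm.getD 0 0 := List.getD_append _ _ _ _ (by omega)
    rw [show pvSecond (nm ++ [c]) (0 + 1)
          = if (nm ++ [c]).getD 0 0 ≠ 0 then (nm ++ [c]).take 0 else pvSecond (nm ++ [c]) 0
        from rfl,
       show pvSecond nm (0 + 1) = if nm.getD 0 0 ≠ 0 then nm.take 0 else pvSecond nm 0
        from rfl,
       hg, if_pos h0, if_pos h0]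
    simp
  | succ j ih =>
    intro h1
    have hg : (nm ++ [c]).getD (j + 1) 0 = nm.getD (j + 1) 0 :=
      List.getD_append _ _ _ _ (by omega)
    rw [show pvSecond (nm ++ [c]) (j + 1 + 1)
          = if (nm ++ [c]).getD (j + 1) 0 ≠ 0 then (nm ++ [c]).take (j + 1)
            else pvSecond (nm ++ [c]) (j + 1) from rfl,
       show pvSecond nm (j + 1 + 1)
          = if nm.getD (j + 1) 0 ≠ 0 then nm.take (j + 1) else pvSecond nm (j + 1) from rfl,
       hg]
    by_cases hnz : nm.getD (j + 1) 0 ≠ 0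
    · rw [if_pos hnz, if_pos hnz, List.take_append_of_le_length (by omega)]
    · rw [if_neg hnz, if_neg hnz]
      exact ih (by omega)

theorem getD_zero_append_cons (u w : List Int) (b : Int) :
    (u ++ b :: w).getD 0 0 = (u ++ [b]).getD 0 0 := by
  cases u <;> simp

theorem pvSecond_main (u w : List Int) (b : Int) (hb : b ≠ 0) (hw : ∀ x ∈ w, x = 0)
    (h0 : (u ++ b :: w).getD 0 0 ≠ 0) :
    pvSecond (u ++ b :: w) (u ++ b :: w).length = u := by
  induction w using List.reverseRecOn with
  | nil =>
    have hlen : (u ++ [b]).length = u.length + 1 := by simp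
    rw [hlen]
    have hg : (u ++ [b]).getD u.length 0 = b := by
      simp [List.getD_eq_getElem?_getD]
    rw [show pvSecond (u ++ [b]) (u.length + 1)
          = if (u ++ [b]).getD u.length 0 ≠ 0 then (u ++ [b]).take u.length
            else pvSecond (u ++ [b]) u.length from rfl,
       hg, if_pos hb, List.take_append_of_le_length (le_refl u.length)]
    simp
  | append_singleton w' c ihw =>
    have hc : c = 0 := hw c (by simp)
    have hw' : ∀ x ∈ w', x = 0 := fun x hx => hw x (by simp [hx])
    have h0' : (u ++ b :: w').getD 0 0 ≠ 0 := by
      rw [getD_zero_append_cons]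
      rw [getD_zero_append_cons] at h0
      exact h0
    have hassoc : u ++ b :: (w' ++ [c]) = (u ++ b :: w') ++ [c] := by simp
    rw [hassoc]
    have hlen : ((u ++ b :: w') ++ [c]).length = (u ++ b :: w').length + 1 := by
      simp; omega
    rw [hlen]
    have hg : ((u ++ b :: w') ++ [c]).getD (u ++ b :: w').length 0 = c := by
      simp [List.getD_eq_getElem?_getD]
    rw [show pvSecond ((u ++ b :: w') ++ [c]) ((u ++ b :: w').length + 1)
          = if ((u ++ b :: w') ++ [c]).getD (u ++ b :: w').length 0 ≠ 0
            then ((u ++ b :: w') ++ [c]).take (u ++ b :: w').length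
            else pvSecond ((u ++ b :: w') ++ [c]) (u ++ b :: w').length from rfl,
       hg, hc, if_neg (by simp)]
    obtain ⟨j, hj⟩ : ∃ j, (u ++ b :: w').length = j + 1 :=
      ⟨(u ++ b :: w').length - 1, by simp; omega⟩
    rw [hj, pvSecond_concat _ _ h0' j (by omega), ← hj]
    exact ihw hw' h0'

theorem decomp_front (l : List Int) (h : ∃ x ∈ l, x ≠ 0) :
    ∃ z a t, l = z ++ a :: t ∧ (∀ x ∈ z, x = 0) ∧ a ≠ 0 := by
  induction l with
  | nil => simp at h
  | cons x t ih =>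
    by_cases hx : x = 0
    · obtain ⟨y, hy, hy0⟩ := h
      have ht : ∃ y ∈ t, y ≠ 0 := by
        rcases List.mem_cons.mp hy with rfl | hy'
        · exact absurd hx hy0
        · exact ⟨y, hy', hy0⟩
      obtain ⟨z, a, t', rfl, hz, ha⟩ := ih ht
      exact ⟨x :: z, a, t', by simp, by simpa [hx] using hz, ha⟩
    · exact ⟨[], x, t, by simp, by simp, hx⟩

theorem decomp_back (l : List Int) (h : ∃ x ∈ l, x ≠ 0) :
    ∃ u b w, l = u ++ b :: w ∧ b ≠ 0 ∧ (∀ x ∈ w, x = 0) := by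
  have hr : ∃ x ∈ l.reverse, x ≠ 0 := by simpa using h
  obtain ⟨z, a, t, hrev, hz, ha⟩ := decomp_front l.reverse hr
  refine ⟨t.reverse, a, z.reverse, ?_, ha, fun x hx => hz x (by simpa using hx)⟩
  have := congrArg List.reverse hrev
  simpa using this

-- ===== VERDICT (by name: the statement is the Claim_ definition above) =====
theorem nzIdx_main (z u w : List Int) (b : Int) (hz : ∀ x ∈ z, x = 0)
    (hw : ∀ x ∈ w, x = 0) (hb : b ≠ 0) :
    nzIdx (z ++ (u ++ b :: w)) 0
      = nzIdx u (z.length : Int) ++ [(z.length : Int) + u.length] := by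
  rw [nzIdx_append, nzIdx_zeros z 0 hz, nzIdx_append, nzIdx_cons,
      nzIdx_zeros w _ hw, if_pos hb]
  simp

theorem get_gap_len_spec : Claim_equal_get_gap_len := by
  intro mark _ hpre
  unfold Spec_get_gap_len
  obtain ⟨z, a, t, rfl, hz, ha⟩ := decomp_front mark hpre
  obtain ⟨u, b, w, hsplit, hb, hw⟩ := decomp_back (a :: t) ⟨a, by simp, ha⟩
  -- A's value: the zero count of u
  have h0 : (u ++ b :: w).getD 0 0 ≠ 0 := by
    rw [← hsplit]; simpa using ha
  have hA : get_gap_len (z ++ a :: t) = (u.countP (fun x => x == 0) : Int) := by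
    unfold get_gap_len
    rw [pvFirst_zeros z _ hz, pvFirst_cons_ne a t ha, hsplit]
    simp only [pvSecond_main u w b hb hw h0]
    rw [PySem.List.foldl_ite_add_one]
    norm_num
    rfl
  -- B's value
  have hnz : ((PySem.List.enumerate (z ++ a :: t) 0).filter (fun p => p.2 != 0)).map
      (fun p => p.1) = nzIdx u (z.length : Int) ++ [(z.length : Int) + u.length] := by
    rw [hsplit]
    exact nzIdx_main z u w b hz hw hb
  rw [hA]
  unfold get_gap_len_alt
  rw [hnz]
  cases u with
  | nil =>
    rw [nzIdx_nil, List.nil_append]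
    simp
  | cons a' u' =>
    have hcons : a :: t = a' :: (u' ++ b :: w) := by simpa using hsplit
    have h1 : a = a' := by
      simpa using congrArg (fun l => l.headD 0) hcons
    have ha' : a' ≠ 0 := h1 ▸ ha
    rw [nzIdx_cons, if_pos ha']
    have hcnt0 : (a' :: u').countP (fun x => x == 0) = u'.countP (fun x => x == 0) := by
      simp [ha']
    rw [hcnt0]
    have hcount := count_split u'
    have hlen1 : (nzIdx u' ((z.length : Int) + 1)).length = u'.countP (fun x => x != 0) :=
      nzIdx_length _ _
    simp only [List.cons_append, List.length_cons, List.length_append, hlen1]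
    rw [List.getLastD_concat]
    simp only [List.length_nil]
    push_cast
    omega
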